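-- pv_equiv track=rewrite | github.com/ajittgosavii/awswar | ai_lens_integration.py | _calculate_lens_score
-- ===== SOURCE A (Python) =====
-- from typing import Dict, List, Optional, Any, Tuple
--
-- def _calculate_lens_score(responses: Dict) -> int:
--     """Calculate score from AI Lens responses"""
--     if not responses:
--         return 0
--
--     total = len(responses)
--     points = 0
--
--     for r in responses.values():
--         risk = r.get("risk", "HIGH_RISK")
--         if risk == "NO_RISK":
--             points += 100
--         elif risk == "MEDIUM_RISK":
--             points += 50
--
--     return int(points / total) if total > 0 else 0
-- ===== SOURCE B (Python) =====
-- def _points(risks):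
--     """Total score points of a list of risk strings, by divide and conquer."""
--     if len(risks) <= 1:
--         if not risks:
--             return 0
--         risk = risks[0]
--         return 100 if risk == "NO_RISK" else 50 if risk == "MEDIUM_RISK" else 0
--     mid = len(risks) // 2
--     return _points(risks[:mid]) + _points(risks[mid:])
--
-- def _calculate_lens_score(responses):
--     """Extract the risk strings, score them by recursive halving, then average."""
--     if not responses:
--         return 0
--     risks = [r.get("risk", "HIGH_RISK") for r in responses.values()]
--     return int(_points(risks) / len(risks))
-- ===== Notes on version B (the rewrite author's own statement) =====
-- stated objective: alternative
-- what changed: Replaces the single accumulator loop by a two-stage design: extract the risk strings, then total their weights with a recursive divide-and-conquer (halving) sum instead of any loop, and average at the end.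
import Mathlib
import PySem

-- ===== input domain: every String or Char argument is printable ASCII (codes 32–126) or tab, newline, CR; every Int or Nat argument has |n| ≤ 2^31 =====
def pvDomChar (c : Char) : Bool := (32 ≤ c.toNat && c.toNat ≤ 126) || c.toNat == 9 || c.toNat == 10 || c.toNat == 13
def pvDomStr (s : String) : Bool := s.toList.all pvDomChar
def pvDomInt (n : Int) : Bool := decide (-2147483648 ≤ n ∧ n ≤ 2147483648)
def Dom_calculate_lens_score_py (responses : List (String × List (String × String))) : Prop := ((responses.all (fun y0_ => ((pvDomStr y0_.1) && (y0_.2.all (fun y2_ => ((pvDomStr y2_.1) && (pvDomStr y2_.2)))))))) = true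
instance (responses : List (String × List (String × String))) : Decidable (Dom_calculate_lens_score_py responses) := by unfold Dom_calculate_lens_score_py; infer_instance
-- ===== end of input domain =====

-- B replaces A's single branch-and-accumulate loop by extract-then-divide-and-conquer: it first maps the
-- responses to their risk strings, then totals the weights by recursive halving, then averages (objective:
-- alternative). Both ports render Python's 'int(points / total)' as floor division, which is exact here:
-- points is non-negative and bounded by 100 * total, so truncation equals floor.

-- ===== PORT A =====
-- the body of A's 'for r in responses.values(): …' loop
def pvStepA (pts : Int) (p : String × List (String × String)) : Int :=
  let risk := (PySem.Dict.ofList p.2).getD "risk" "HIGH_RISK"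
  if risk = "NO_RISK" then pts + 100
  else if risk = "MEDIUM_RISK" then pts + 50
  else pts

def calculate_lens_score_py (responses : List (String × List (String × String))) : Int :=
  if responses = [] then 0
  else
    let total : Int := responses.length
    let points : Int := responses.foldl pvStepA 0
    if total > 0 then PySem.Int.floordiv points total else 0

-- ===== PORT B =====
-- Source B's _points: divide-and-conquer total of the risk weights
def pvPointsB (risks : List String) : Int :=
  if _h : risks.length ≤ 1 then
    match risks with
    | [] => 0
    | r :: _ => if r = "NO_RISK" then 100 else if r = "MEDIUM_RISK" then 50 else 0
  else
    let mid := risks.length / 2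
    pvPointsB (risks.take mid) + pvPointsB (risks.drop mid)
termination_by risks.length
decreasing_by
  · simp only [List.length_take]; omega
  · simp only [List.length_drop]; omega

-- Source B's risk-extraction comprehension
def pvRisk (p : String × List (String × String)) : String :=
  (PySem.Dict.ofList p.2).getD "risk" "HIGH_RISK"

def calculate_lens_score_py_alt (responses : List (String × List (String × String))) : Int :=
  if responses = [] then 0
  else
    let risks := responses.map pvRisk
    PySem.Int.floordiv (pvPointsB risks) risks.length

-- ===== PRECONDITION & SPEC =====
def Spec_calculate_lens_score_py (responses : List (String × List (String × String))) (out : Int) : Prop := out = calculate_lens_score_py_alt responses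
instance (responses : List (String × List (String × String))) (out : Int) : Decidable (Spec_calculate_lens_score_py responses out) := by unfold Spec_calculate_lens_score_py; infer_instance

-- ===== CLAIM (what is proved, stated in full; the proofs are below) =====
def Claim_equal_calculate_lens_score_py : Prop := ∀ (responses : List (String × List (String × String))), Dom_calculate_lens_score_py responses → Spec_calculate_lens_score_py responses (calculate_lens_score_py responses)

-- ===== LEMMAS AND PROOFS =====

/-- The weight one risk string contributes to the score. -/
def pvWeight (r : String) : Int :=
  if r = "NO_RISK" then 100 else if r = "MEDIUM_RISK" then 50 else 0

/-- B's divide-and-conquer sum equals the plain sum of the weights. -/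
theorem pvPointsB_eq_sum (risks : List String) :
    pvPointsB risks = (risks.map pvWeight).sum := by
  fun_induction pvPointsB risks with
  | case1 => simp
  | case2 t _ h =>
      obtain rfl : t = [] := by simpa using h
      simp [pvWeight]
  | case3 t _ _ h =>
      obtain rfl : t = [] := by simpa using h
      simp [pvWeight]
  | case4 r t _ h1 h2 h =>
      obtain rfl : t = [] := by simpa using h
      simp [pvWeight, h1, h2]
  | case5 x h mid ih2 ih1 =>
      rw [ih2, ih1, ← List.sum_append, ← List.map_append, List.take_append_drop]

/-- A's accumulation loop equals the plain sum of the weights of the extracted risks. -/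
theorem foldA_eq_sum (responses : List (String × List (String × String))) (acc : Int) :
    responses.foldl pvStepA acc = acc + ((responses.map pvRisk).map pvWeight).sum := by
  induction responses generalizing acc with
  | nil => simp
  | cons p t ih =>
    simp only [List.foldl_cons, List.map_cons, List.sum_cons, ih]
    simp only [pvStepA, pvRisk, pvWeight]
    split_ifs <;> ring

theorem calculate_lens_score_py_eq (responses : List (String × List (String × String))) :
    calculate_lens_score_py responses = calculate_lens_score_py_alt responses := by
  unfold calculate_lens_score_py calculate_lens_score_py_alt
  by_cases hn : responses = []
  · rw [if_pos hn, if_pos hn]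
  · rw [if_neg hn, if_neg hn]
    have htot : (0 : Int) < responses.length := by
      have : responses.length ≠ 0 := by simpa using hn
      omega
    simp only [foldA_eq_sum, pvPointsB_eq_sum, List.length_map, if_pos htot, zero_add]

-- ===== VERDICT (by name: the statement is the Claim_ definition above) =====
theorem calculate_lens_score_py_spec : Claim_equal_calculate_lens_score_py := by
  intro responses _
  exact calculate_lens_score_py_eq responses
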